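-- pv_equiv track=rewrite | github.com/eliottcassidy2000/math | 04-computation/euler_transform.py | ogf_inverse
-- ===== SOURCE A (Python) =====
-- def ogf_inverse(T, max_n):
--     """Compute strongly connected count from tournament count via OGF inversion.
--
--     If B(x) = sum T(n) x^n, then SC(n) comes from 1 - 1/B(x).
--     This is: b[0] = 1, b[n] = -sum_{k=1}^n T[k]*b[n-k] for n >= 1
--     SC(n) = -b[n] for n >= 1.
--     """
--     from fractions import Fraction
--     b = [Fraction(0)] * (max_n + 1)
--     b[0] = Fraction(1)
--     for n in range(1, max_n + 1):
--         s = Fraction(0)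
--         for k in range(1, n + 1):
--             if k in T:
--                 s += T[k] * b[n - k]
--         b[n] = -s
--
--     sc = {}
--     for n in range(1, max_n + 1):
--         sc[n] = int(-b[n])
--     return sc
-- ===== SOURCE B (Python) =====
-- def ogf_inverse(T, max_n):
--     """Push/scatter OGF inversion: each known coefficient b[m] scatters its
--     contributions T[k]*b[m] forward into s[m+k]; s[n] is complete when n is reached."""
--     s = [0] * (max_n + 1)
--     sc = {}
--     for m in range(max_n + 1):
--         bm = 1 if m == 0 else -s[m]
--         if m >= 1:
--             sc[m] = s[m]
--         for k, v in T.items():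
--             if 1 <= k <= max_n - m:
--                 s[m + k] += v * bm
--     return sc
-- ===== Notes on version B (the rewrite author's own statement) =====
-- stated objective: alternative
-- what changed: Replaces A's pull convolution (for each n, an inner scan over all k=1..n testing `k in T`) by a push/scatter convolution that iterates only over T's items and scatters each finalized coefficient's contributions forward into an accumulator, so the per-n membership scan disappears.
import Mathlib
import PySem

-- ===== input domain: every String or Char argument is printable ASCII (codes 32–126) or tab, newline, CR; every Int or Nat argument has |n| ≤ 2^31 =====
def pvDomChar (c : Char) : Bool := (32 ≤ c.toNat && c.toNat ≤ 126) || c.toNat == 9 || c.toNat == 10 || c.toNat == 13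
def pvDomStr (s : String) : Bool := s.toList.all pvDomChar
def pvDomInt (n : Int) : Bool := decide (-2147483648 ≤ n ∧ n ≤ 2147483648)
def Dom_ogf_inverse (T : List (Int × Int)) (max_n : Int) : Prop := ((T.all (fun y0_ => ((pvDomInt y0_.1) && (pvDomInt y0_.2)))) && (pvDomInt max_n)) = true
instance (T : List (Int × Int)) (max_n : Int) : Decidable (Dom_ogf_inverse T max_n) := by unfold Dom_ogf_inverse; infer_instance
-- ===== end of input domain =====

-- B replaces A's per-n pull convolution (inner scan over k with `k in T`) by a push/scatter
-- convolution that iterates only over T's items and scatters each known coefficient forward;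
-- equivalence of RETURN values is proved (neither program mutates its arguments).

-- ===== PORT A =====
-- Python's Fraction arithmetic stays integer-valued here (all inputs are ints), so Int is exact.
def ogf_inverse (T : List (Int × Int)) (max_n : Int) : List (Int × Int) :=
  let Td := PySem.Dict.mk T
  let b0 : List Int := List.replicate (max_n + 1).toNat 0     -- [Fraction(0)] * (max_n + 1)
  let b1 := PySem.List.pySetD b0 0 1                          -- b[0] = Fraction(1)
  let b := (PySem.List.pyRange 1 (max_n + 1) 1).foldl (fun b n =>
      let s := (PySem.List.pyRange 1 (n + 1) 1).foldl (fun s k =>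
          match Td.get? k with                                -- if k in T: s += T[k] * b[n-k]
          | some v => s + v * PySem.List.pyGetD b (n - k) 0
          | none => s) 0
      PySem.List.pySetD b n (-s)) b1                          -- b[n] = -s
  ((PySem.List.pyRange 1 (max_n + 1) 1).foldl (fun sc n =>
      sc.insert n (-(PySem.List.pyGetD b n 0))) (PySem.Dict.empty : PySem.Dict Int Int)).items

-- ===== PORT B =====
def ogf_inverse_alt (T : List (Int × Int)) (max_n : Int) : List (Int × Int) :=
  let s0 : List Int := List.replicate (max_n + 1).toNat 0     -- s = [0] * (max_n + 1)
  let res := (PySem.List.pyRange 0 (max_n + 1) 1).foldl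
      (fun (st : List Int × PySem.Dict Int Int) m =>
        let bm : Int := if m == 0 then 1 else -(PySem.List.pyGetD st.1 m 0)
        let sc := if 1 ≤ m then st.2.insert m (PySem.List.pyGetD st.1 m 0) else st.2
        let s := T.foldl (fun s kv =>
            if 1 ≤ kv.1 ∧ kv.1 ≤ max_n - m then
              PySem.List.pySetD s (m + kv.1) (PySem.List.pyGetD s (m + kv.1) 0 + kv.2 * bm)
            else s) st.1
        (s, sc)) (s0, (PySem.Dict.empty : PySem.Dict Int Int))
  res.2.items

-- ===== PRECONDITION & SPEC =====
-- Pre_ excludes max_n < 0, where A raises IndexError, and association lists with duplicate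
-- keys, which do not represent a Python dict (both Pythons receive a dict and cannot see them).
def Pre_ogf_inverse (T : List (Int × Int)) (max_n : Int) : Prop :=
  0 ≤ max_n ∧ (T.map Prod.fst).Nodup
instance (T : List (Int × Int)) (max_n : Int) : Decidable (Pre_ogf_inverse T max_n) := by
  unfold Pre_ogf_inverse; infer_instance
def pvWitness_ogf_inverse : (List (Int × Int)) × Int := ([(1, 1), (2, 2)], 3)

def Spec_ogf_inverse (T : List (Int × Int)) (max_n : Int) (out : List (Int × Int)) : Prop :=
  out = ogf_inverse_alt T max_n
instance (T : List (Int × Int)) (max_n : Int) (out : List (Int × Int)) :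
    Decidable (Spec_ogf_inverse T max_n out) := by unfold Spec_ogf_inverse; infer_instance

-- ===== CLAIM (what is proved, stated in full; the proofs are below) =====
def Claim_equal_ogf_inverse : Prop := ∀ (T : List (Int × Int)) (max_n : Int),
  Dom_ogf_inverse T max_n → Pre_ogf_inverse T max_n →
  Spec_ogf_inverse T max_n (ogf_inverse T max_n)
-- ===== LEMMAS AND PROOFS =====

-- value of key k in T (0 if absent); matches A's `if k in T: … T[k] …` summand
def tv (T : List (Int × Int)) (k : Int) : Int := ((PySem.Dict.mk T).get? k).getD 0

-- [c 0, c 1, …, c n]: the coefficient sequence b of the Python, built by structural recursion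
def cvec (T : List (Int × Int)) : Nat → List Int
  | 0 => [1]
  | n + 1 =>
    let prev := cvec T n
    prev ++ [-(((List.range (n + 1)).map (fun j : Nat => tv T ((j : Int) + 1) * prev.getD (n - j) 0)).sum)]

def cf (T : List (Int × Int)) (n : Nat) : Int := (cvec T n).getD n 0

theorem cvec_length (T : List (Int × Int)) (n : Nat) : (cvec T n).length = n + 1 := by
  induction n with
  | zero => rfl
  | succ n ih => simp [cvec, ih]

theorem list_sum_range (f : Nat → Int) (n : Nat) :
    ((List.range n).map f).sum = ∑ i ∈ Finset.range n, f i := rfl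

theorem cvec_getD (T : List (Int × Int)) {i n : Nat} (h : i ≤ n) :
    (cvec T n).getD i 0 = cf T i := by
  induction n with
  | zero => cases Nat.le_zero.mp h; rfl
  | succ n ih =>
    by_cases hi : i ≤ n
    · rw [show cvec T (n + 1) = cvec T n ++
        [-(((List.range (n + 1)).map (fun j : Nat => tv T ((j : Int) + 1) * (cvec T n).getD (n - j) 0)).sum)] from rfl,
        List.getD_append _ _ _ _ (by rw [cvec_length]; omega)]
      exact ih hi
    · have : i = n + 1 := by omega
      subst this; rfl

theorem cf_succ (T : List (Int × Int)) (n : Nat) :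
    cf T (n + 1) = -(((List.range (n + 1)).map (fun j : Nat => tv T ((j : Int) + 1) * cf T (n - j))).sum) := by
  have h1 : cf T (n + 1) = (cvec T n ++
      [-(((List.range (n + 1)).map (fun j : Nat => tv T ((j : Int) + 1) * (cvec T n).getD (n - j) 0)).sum)]).getD (n + 1) 0 := rfl
  rw [h1, List.getD_append_right _ _ _ _ (by rw [cvec_length])]
  rw [cvec_length]
  simp only [Nat.sub_self, List.getD_cons_zero, neg_inj]
  apply congrArg
  apply List.map_congr_left
  intro j hj
  rw [cvec_getD T (by simp at hj; omega)]

-- reflected form used by the scatter side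
theorem cf_pos (T : List (Int × Int)) (M : Nat) (h : 1 ≤ M) :
    cf T M = -(((List.range M).map (fun m : Nat => tv T ((M : Int) - (m : Int)) * cf T m)).sum) := by
  obtain ⟨n, rfl⟩ : ∃ n, M = n + 1 := ⟨M - 1, by omega⟩
  rw [cf_succ, list_sum_range, list_sum_range, neg_inj]
  push_cast
  rw [← Finset.sum_range_reflect (fun m : Nat => tv T (((n : Int) + 1) - (m : Int)) * cf T m) (n + 1)]
  apply Finset.sum_congr rfl
  intro j hj
  have hjn : j ≤ n := by simpa [Nat.lt_succ_iff] using hj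
  rw [show n + 1 - 1 - j = n - j from by omega,
    show ((n : Int) + 1 - ((n - j : Nat) : Int)) = (j : Int) + 1 from by push_cast [Nat.cast_sub hjn]; ring]

-- the common output: keys 1..max_n with values -c n
def outSpec (T : List (Int × Int)) (max_n : Int) : List (Int × Int) :=
  (PySem.List.pyRange 1 (max_n + 1) 1).map (fun n => (n, -(cf T n.toNat)))

theorem getD_set (l : List Int) (i j : Nat) (v : Int) (hi : i < l.length) :
    (l.set i v).getD j 0 = if j = i then v else l.getD j 0 := by
  simp only [List.getD, List.getElem?_set]
  by_cases h : i = j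
  · subst h; simp [hi]
  · rw [if_neg h, if_neg (fun hh => h hh.symm)]

-- inserting strictly increasing fresh keys appends the pairs in order
theorem dict_fold_insert (g : Int → Int) (a b : Int) (d : PySem.Dict Int Int)
    (hd : ∀ k ∈ d.keys, k < a) :
    ((PySem.List.pyRange a b 1).foldl (fun sc n => sc.insert n (g n)) d).items
      = d.items ++ (PySem.List.pyRange a b 1).map (fun n => (n, g n)) := by
  by_cases hab : b ≤ a
  · simp [PySem.List.pyRange_one_eq_nil hab]
  · have hlt : a < b := lt_of_not_ge hab
    have hc : d.contains a = false := by
      rw [Bool.eq_false_iff]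
      intro hcon
      exact absurd (hd a ((PySem.Dict.contains_iff_mem_keys d a).mp hcon)) (lt_irrefl a)
    have hkeys : ∀ k ∈ (d.insert a (g a)).keys, k < a + 1 := by
      intro k hk
      rw [PySem.Dict.keys_insert_of_not_contains d (g a) hc] at hk
      rcases List.mem_append.mp hk with h | h
      · exact lt_trans (hd k h) (by omega)
      · simp at h; omega
    rw [PySem.List.pyRange_one_cons hlt, List.foldl_cons,
      dict_fold_insert g (a + 1) b (d.insert a (g a)) hkeys,
      PySem.Dict.items_insert_of_not_contains d (g a) hc, List.map_cons, List.append_assoc,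
      List.singleton_append]
termination_by (b - a).toNat
decreasing_by omega

-- invariant of A's b-filling loop
theorem A_loop (T : List (Int × Int)) (N : Nat) (j : Nat) (hj : j ≤ N) :
    (PySem.List.pyRange 1 ((j : Int) + 1) 1).foldl
      (fun b n =>
        let s := (PySem.List.pyRange 1 (n + 1) 1).foldl (fun s k =>
            match (PySem.Dict.mk T).get? k with
            | some v => s + v * PySem.List.pyGetD b (n - k) 0
            | none => s) 0
        PySem.List.pySetD b n (-s))
      (PySem.List.pySetD (List.replicate (N + 1) (0 : Int)) 0 1)
    = (List.range (j + 1)).map (cf T) ++ List.replicate (N - j) (0 : Int) := by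
  induction j with
  | zero =>
    rw [show ((0 : Nat) : Int) + 1 = 1 from by norm_num, PySem.List.pyRange_one_eq_nil le_rfl,
      List.foldl_nil, PySem.List.pySetD_of_nonneg _ _ le_rfl]
    rw [show (N + 1) = 1 + N from by omega, List.replicate_add]
    simp [cf, cvec]
  | succ j ih =>
    have hjN : j ≤ N := by omega
    rw [show ((j + 1 : Nat) : Int) + 1 = ((j : Int) + 1) + 1 from by push_cast; ring,
      PySem.List.pyRange_one_succ_right (by omega), List.foldl_append, List.foldl_cons,
      List.foldl_nil, ih hjN]
    set b : List Int := (List.range (j + 1)).map (cf T) ++ List.replicate (N - j) (0 : Int) with hb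
    have hblen : b.length = N + 1 := by simp [hb]; omega
    -- the inner sum is the pull convolution giving cf T (j+1)
    have hinner : (PySem.List.pyRange 1 (((j : Int) + 1) + 1) 1).foldl (fun s k =>
        match (PySem.Dict.mk T).get? k with
        | some v => s + v * PySem.List.pyGetD b (((j : Int) + 1) - k) 0
        | none => s) 0 = -(cf T (j + 1)) := by
      rw [PySem.List.foldl_congr_mem _ _
        (fun s k => s + tv T k * PySem.List.pyGetD b (((j : Int) + 1) - k) 0) _ ?_]
      · rw [PySem.List.foldl_add, zero_add, PySem.List.pyRange_one,
          show (((j : Int) + 1) + 1 - 1).toNat = j + 1 from by omega, List.map_map]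
        rw [cf_succ, neg_neg, list_sum_range, list_sum_range]
        apply Finset.sum_congr rfl
        intro k hk
        have hkj : k ≤ j := by simpa [Nat.lt_succ_iff] using hk
        simp only [Function.comp]
        have hidx : ((j : Int) + 1) - (1 + (k : Int)) = ((j - k : Nat) : Int) := by
          push_cast [Nat.cast_sub hkj]; ring
        rw [hidx, PySem.List.pyGetD_of_nonneg _ _ (by positivity), Int.toNat_natCast, hb,
          List.getD_append _ _ _ _ (by simp only [List.length_map, List.length_range]; omega),
          PySem.List.getD_map_range _ _ _ _ (by omega)]
        congr 2
        ring
      · intro acc x _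
        cases h : (PySem.Dict.mk T).get? x with
        | some v => simp [tv, h]
        | none => simp [tv, h]
    rw [hinner]
    show PySem.List.pySetD b ((j : Int) + 1) (-(-cf T (j + 1))) =
      (List.range (j + 1 + 1)).map (cf T) ++ List.replicate (N - (j + 1)) (0 : Int)
    rw [neg_neg, PySem.List.pySetD_of_nonneg _ _ (by positivity),
      show (((j : Int) + 1)).toNat = j + 1 from by omega]
    rw [hb, show N - j = 1 + (N - (j + 1)) from by omega, List.replicate_add,
      List.replicate_one, List.set_append_right _ _ (by simp)]
    simp only [List.length_map, List.length_range, Nat.sub_self, List.singleton_append,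
      List.set_cons_zero]
    simp [List.range_succ]

-- A computes outSpec
theorem A_eq (T : List (Int × Int)) (max_n : Int) (h0 : 0 ≤ max_n) :
    ogf_inverse T max_n = outSpec T max_n := by
  obtain ⟨N, rfl⟩ : ∃ N : Nat, max_n = (N : Int) := ⟨max_n.toNat, (Int.toNat_of_nonneg h0).symm⟩
  simp only [ogf_inverse]
  rw [show ((N : Int) + 1).toNat = N + 1 from by omega, A_loop T N N le_rfl]
  simp only [Nat.sub_self, List.replicate_zero, List.append_nil]
  rw [PySem.List.foldl_congr_mem _ _
    (fun sc n => sc.insert n (-(cf T n.toNat))) _ ?_]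
  · rw [dict_fold_insert (fun n => -(cf T n.toNat)) 1 ((N : Int) + 1) PySem.Dict.empty
      (by intro k hk; simp [PySem.Dict.keys_empty] at hk)]
    rfl
  · intro acc x hx
    have hx1 : 1 ≤ x ∧ x < (N : Int) + 1 := (PySem.List.mem_pyRange_one).mp hx
    rw [PySem.List.pyGetD_of_nonneg _ _ (by omega),
      PySem.List.getD_map_range _ _ _ _ (by omega)]

theorem tv_cons (k v : Int) (rest : List (Int × Int)) (x : Int) :
    tv ((k, v) :: rest) x = if k = x then v else tv rest x := by
  simp only [tv, PySem.Dict.get?_mk_cons, beq_iff_eq]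
  split_ifs <;> rfl

theorem tv_not_mem (T : List (Int × Int)) (x : Int) (h : x ∉ T.map Prod.fst) : tv T x = 0 := by
  have hn : (PySem.Dict.mk T).get? x = none :=
    (PySem.Dict.get?_eq_none_iff_not_mem_keys _ _).mpr (by simpa [PySem.Dict.keys_mk] using h)
  simp [tv, hn]

-- one scatter pass: pointwise effect of pushing bm's contributions into s
theorem scatter_step (T : List (Int × Int)) (hnd : (T.map Prod.fst).Nodup)
    (max_n m bm : Int) (hm : 0 ≤ m) (s : List Int) (hs : (s.length : Int) = max_n + 1) :
    (T.foldl (fun s kv =>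
        if 1 ≤ kv.1 ∧ kv.1 ≤ max_n - m then
          PySem.List.pySetD s (m + kv.1) (PySem.List.pyGetD s (m + kv.1) 0 + kv.2 * bm)
        else s) s).length = s.length ∧
    ∀ i : Nat, (i : Int) < max_n + 1 →
      (T.foldl (fun s kv =>
          if 1 ≤ kv.1 ∧ kv.1 ≤ max_n - m then
            PySem.List.pySetD s (m + kv.1) (PySem.List.pyGetD s (m + kv.1) 0 + kv.2 * bm)
          else s) s).getD i 0
        = s.getD i 0 +
          (if m + 1 ≤ (i : Int) ∧ (i : Int) ≤ max_n then tv T ((i : Int) - m) * bm else 0) := by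
  induction T generalizing s with
  | nil =>
    refine ⟨rfl, fun i hi => ?_⟩
    rw [tv_not_mem [] _ (by simp)]
    simp
  | cons kv rest ih =>
    obtain ⟨k, v⟩ := kv
    have hnd2 := hnd
    rw [List.map_cons, List.nodup_cons] at hnd2
    obtain ⟨hk_notmem, hnd'⟩ := hnd2
    simp only [List.foldl_cons]
    by_cases hg : 1 ≤ k ∧ k ≤ max_n - m
    · rw [if_pos hg]
      have hmk0 : 0 ≤ m + k := by omega
      have hmklt : m + k < (s.length : Int) := by omega
      rw [PySem.List.pySetD_of_nonneg _ _ hmk0, PySem.List.pyGetD_of_nonneg _ _ hmk0]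
      set s1 := s.set (m + k).toNat (s.getD (m + k).toNat 0 + v * bm) with hs1
      have hlen1 : s1.length = s.length := by simp [hs1]
      obtain ⟨hlenr, hr⟩ := ih hnd' s1 (by rw [hlen1]; exact hs)
      refine ⟨by rw [hlenr, hlen1], ?_⟩
      intro i hi
      rw [hr i hi, hs1, getD_set _ _ _ _ (by omega)]
      by_cases hik : (i : Int) = m + k
      · rw [if_pos (by omega), if_pos (by omega), if_pos (by omega),
          tv_cons, if_pos (by omega),
          tv_not_mem rest ((i : Int) - m) (by rw [show (i : Int) - m = k from by omega]; exact hk_notmem)]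
        rw [show (m + k).toNat = i from by omega]
        ring
      · rw [if_neg (by omega)]
        congr 1
        by_cases hc : m + 1 ≤ (i : Int) ∧ (i : Int) ≤ max_n
        · rw [if_pos hc, if_pos hc, tv_cons, if_neg (by omega)]
        · rw [if_neg hc, if_neg hc]
    · rw [if_neg hg]
      obtain ⟨hlenr, hr⟩ := ih hnd' s hs
      refine ⟨hlenr, ?_⟩
      intro i hi
      rw [hr i hi]
      congr 1
      by_cases hc : m + 1 ≤ (i : Int) ∧ (i : Int) ≤ max_n
      · rw [if_pos hc, if_pos hc, tv_cons, if_neg (by omega)]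
      · rw [if_neg hc, if_neg hc]

-- s[i] after B has processed m = 0 .. M-1
def partialS (T : List (Int × Int)) (M i : Nat) : Int :=
  ((List.range (min M i)).map (fun m : Nat => tv T ((i : Int) - (m : Int)) * cf T m)).sum

def scat (T : List (Int × Int)) (N M : Nat) : List Int :=
  (List.range (N + 1)).map (partialS T M)

theorem partialS_self (T : List (Int × Int)) (M : Nat) (h : 1 ≤ M) :
    partialS T M M = -(cf T M) := by
  rw [partialS, Nat.min_self, cf_pos T M h, neg_neg]

-- invariant of B's outer loop
theorem B_loop (T : List (Int × Int)) (hnd : (T.map Prod.fst).Nodup) (N M : Nat)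
    (hM : M ≤ N + 1) :
    (PySem.List.pyRange 0 (M : Int) 1).foldl
      (fun (st : List Int × PySem.Dict Int Int) m =>
        let bm : Int := if m == 0 then 1 else -(PySem.List.pyGetD st.1 m 0)
        let sc := if 1 ≤ m then st.2.insert m (PySem.List.pyGetD st.1 m 0) else st.2
        let s := T.foldl (fun s kv =>
            if 1 ≤ kv.1 ∧ kv.1 ≤ (N : Int) - m then
              PySem.List.pySetD s (m + kv.1) (PySem.List.pyGetD s (m + kv.1) 0 + kv.2 * bm)
            else s) st.1
        (s, sc))
      (List.replicate (N + 1) (0 : Int), (PySem.Dict.empty : PySem.Dict Int Int))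
    = (scat T N M,
       PySem.Dict.mk ((PySem.List.pyRange 1 (M : Int) 1).map (fun n => (n, -(cf T n.toNat))))) := by
  induction M with
  | zero =>
    rw [show ((0 : Nat) : Int) = 0 from rfl, PySem.List.pyRange_one_eq_nil le_rfl, List.foldl_nil,
      PySem.List.pyRange_one_eq_nil (by norm_num)]
    have h1 : scat T N 0 = List.replicate (N + 1) (0 : Int) := by
      simp [scat, partialS, List.eq_replicate_iff]
    rw [h1]
    rfl
  | succ M ih =>
    have hMN : M ≤ N := by omega
    rw [show ((M + 1 : Nat) : Int) = (M : Int) + 1 from by push_cast; ring,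
      PySem.List.pyRange_one_succ_right (by positivity), List.foldl_append, List.foldl_cons,
      List.foldl_nil, ih (by omega)]
    have hscatlen : (scat T N M).length = N + 1 := by simp [scat]
    have hread : PySem.List.pyGetD (scat T N M) (M : Int) 0 = partialS T M M := by
      rw [PySem.List.pyGetD_of_nonneg _ _ (by positivity), Int.toNat_natCast, scat,
        PySem.List.getD_map_range _ _ _ _ (by omega)]
    have hbm : (if (M : Int) == 0 then (1 : Int)
        else -(PySem.List.pyGetD (scat T N M) (M : Int) 0)) = cf T M := by
      by_cases hM0 : M = 0
      · subst hM0; rw [if_pos (by norm_num)]; rfl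
      · rw [if_neg (by simpa using (by omega : ¬ ((M : Int) = 0))), hread,
          partialS_self T M (by omega), neg_neg]
    show (T.foldl _ (scat T N M), _) = _
    simp only [hbm]
    obtain ⟨hlen, hpt⟩ := scatter_step T hnd (N : Int) (M : Int) (cf T M) (by positivity)
      (scat T N M) (by rw [hscatlen]; push_cast; ring)
    refine Prod.ext ?_ ?_
    · -- the s component becomes scat T N (M+1)
      show (T.foldl _ (scat T N M)) = scat T N (M + 1)
      apply List.ext_getElem (by rw [hlen, hscatlen]; simp [scat])
      intro i hi1 hi2
      have hiN : i < N + 1 := by rw [hlen, hscatlen] at hi1; exact hi1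
      rw [← List.getD_eq_getElem _ 0 hi1, ← List.getD_eq_getElem _ 0 hi2,
        hpt i (by omega)]
      simp only [scat]
      rw [PySem.List.getD_map_range _ _ _ _ hiN, PySem.List.getD_map_range _ _ _ _ hiN]
      by_cases hiM : M + 1 ≤ i
      · rw [if_pos (by constructor <;> omega)]
        simp only [partialS]
        rw [show min M i = M from by omega, show min (M + 1) i = M + 1 from by omega,
          list_sum_range, list_sum_range, Finset.sum_range_succ]
      · rw [if_neg (by omega)]
        simp only [partialS]
        rw [show min M i = min (M + 1) i from by omega, add_zero]
    · -- the dict component gains key M (when M ≥ 1)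
      show (if 1 ≤ (M : Int) then _ else _) = _
      by_cases hM0 : M = 0
      · subst hM0
        rw [if_neg (by norm_num)]
        rw [PySem.List.pyRange_one_eq_nil (by norm_num : ((0 : Nat) : Int) + 1 ≤ 1)]
        rfl
      · rw [if_pos (by omega : (1 : Int) ≤ (M : Int)), hread, partialS_self T M (by omega)]
        have hkeys : (PySem.Dict.mk ((PySem.List.pyRange 1 (M : Int) 1).map
            (fun n => (n, -(cf T n.toNat))))).contains (M : Int) = false := by
          rw [Bool.eq_false_iff]
          intro hcon
          have := (PySem.Dict.contains_iff_mem_keys _ _).mp hcon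
          rw [PySem.Dict.keys_mk, List.map_map] at this
          obtain ⟨x, hx1, hx2⟩ := List.mem_map.mp this
          have := (PySem.List.mem_pyRange_one).mp hx1
          simp at hx2
          omega
        apply PySem.Dict.ext
        rw [PySem.Dict.items_insert_of_not_contains _ _ hkeys]
        show _ ++ _ = ((PySem.List.pyRange 1 ((M : Int) + 1) 1).map (fun n => (n, -(cf T n.toNat))))
        rw [PySem.List.pyRange_one_succ_right (by omega : (1 : Int) ≤ (M : Int)), List.map_append]
        simp

-- B computes outSpec
theorem B_eq (T : List (Int × Int)) (max_n : Int) (h0 : 0 ≤ max_n)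
    (hnd : (T.map Prod.fst).Nodup) : ogf_inverse_alt T max_n = outSpec T max_n := by
  obtain ⟨N, rfl⟩ : ∃ N : Nat, max_n = (N : Int) := ⟨max_n.toNat, (Int.toNat_of_nonneg h0).symm⟩
  simp only [ogf_inverse_alt]
  rw [show ((N : Int) + 1).toNat = N + 1 from by omega,
    show (N : Int) + 1 = ((N + 1 : Nat) : Int) from by push_cast; ring,
    B_loop T hnd N (N + 1) le_rfl]
  show ((PySem.List.pyRange 1 ((N + 1 : Nat) : Int) 1).map (fun n => (n, -(cf T n.toNat)))) = _
  rw [outSpec, show ((N + 1 : Nat) : Int) = (N : Int) + 1 from by push_cast; ring]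

-- ===== VERDICT (by name: the statement is the Claim_ definition above) =====
theorem ogf_inverse_spec : Claim_equal_ogf_inverse := by
  intro T max_n _ hpre
  unfold Spec_ogf_inverse
  rw [A_eq T max_n hpre.1, B_eq T max_n hpre.1 hpre.2]
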